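-- pv_equiv track=rewrite | github.com/fchchen/code-dojo-ai | services/ml-analyzer/app/pipelines/preprocessing.py | truncate_code
-- ===== SOURCE A (Python) =====
-- MAX_CODE_LENGTH = 512
--
-- def truncate_code(code: str, max_tokens: int = MAX_CODE_LENGTH) -> str:
--     lines = code.splitlines()
--     result: list[str] = []
--     token_count = 0
--     for line in lines:
--         line_tokens = len(line.split())
--         if token_count + line_tokens > max_tokens:
--             break
--         result.append(line)
--         token_count += line_tokens
--     return "\n".join(result) if result else lines[0] if lines else code
-- ===== SOURCE B (Python) =====
-- MAX_CODE_LENGTH = 512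
--
-- def truncate_code(code: str, max_tokens: int = MAX_CODE_LENGTH) -> str:
--     lines = code.splitlines()
--     # build the full prefix-sum table of token counts
--     prefix = []
--     total = 0
--     for line in lines:
--         total += len(line.split())
--         prefix.append(total)
--     # back-to-front scan: largest k with prefix[k-1] <= max_tokens
--     k = len(lines)
--     while k > 0 and prefix[k - 1] > max_tokens:
--         k -= 1
--     if k > 0:
--         return "\n".join(lines[:k])
--     return lines[0] if lines else code
-- ===== Notes on version B (the rewrite author's own statement) =====
-- stated objective: alternative
-- what changed: B precomputes the full prefix-sum table of per-line token counts and finds the cutoff by a back-to-front scan over that table, instead of A's single forward loop that accumulates the result list and breaks early.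
import Mathlib
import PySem

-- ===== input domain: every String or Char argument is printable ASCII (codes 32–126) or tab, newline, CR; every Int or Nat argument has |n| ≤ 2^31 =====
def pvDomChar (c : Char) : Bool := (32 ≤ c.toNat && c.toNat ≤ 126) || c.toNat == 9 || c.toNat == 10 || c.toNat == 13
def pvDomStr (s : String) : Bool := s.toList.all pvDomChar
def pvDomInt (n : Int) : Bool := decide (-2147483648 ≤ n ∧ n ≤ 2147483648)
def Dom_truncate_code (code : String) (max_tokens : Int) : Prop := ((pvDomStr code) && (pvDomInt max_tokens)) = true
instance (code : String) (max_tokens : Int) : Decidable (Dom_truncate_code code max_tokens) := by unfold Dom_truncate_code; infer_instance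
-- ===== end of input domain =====

-- B builds the full prefix-sum table of per-line token counts and finds the cutoff by a
-- back-to-front scan over it, instead of A's forward accumulate-and-break loop (alternative).

-- ===== PORT A =====
-- the for-loop of A: accumulates result list and token count, breaks on overflow
def truncAux (max_tokens : Int) : List String → Int → List String → List String
  | [], _, res => res
  | l :: rest, tc, res =>
    let lt : Int := (PySem.Str.split₀ l).length
    if tc + lt > max_tokens then res
    else truncAux max_tokens rest (tc + lt) (res ++ [l])

def truncate_code (code : String) (max_tokens : Int) : String :=
  let lines := PySem.Str.splitlines code
  let res := truncAux max_tokens lines 0 []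
  if res ≠ [] then PySem.Str.join "\n" res
  else match lines with
       | [] => code
       | l :: _ => l

-- ===== PORT B =====
-- prefix-sum table of per-line token counts
def prefixTab : List String → Int → List Int
  | [], _ => []
  | l :: rest, t =>
    let t' := t + ((PySem.Str.split₀ l).length : Int)
    t' :: prefixTab rest t'

-- the `while k > 0 and prefix[k-1] > max_tokens: k -= 1` scan
def cutScan (p : List Int) (max_tokens : Int) : Nat → Nat
  | 0 => 0
  | k + 1 => if p.getD k 0 > max_tokens then cutScan p max_tokens k else k + 1

def truncate_code_alt (code : String) (max_tokens : Int) : String :=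
  let lines := PySem.Str.splitlines code
  let p := prefixTab lines 0
  let k := cutScan p max_tokens lines.length
  if k > 0 then PySem.Str.join "\n" (lines.take k)
  else match lines with
       | [] => code
       | l :: _ => l

-- ===== PRECONDITION & SPEC =====
def Spec_truncate_code (code : String) (max_tokens : Int) (out : String) : Prop := out = truncate_code_alt code max_tokens
instance (code : String) (max_tokens : Int) (out : String) : Decidable (Spec_truncate_code code max_tokens out) := by unfold Spec_truncate_code; infer_instance

-- ===== CLAIM (what is proved, stated in full; the proofs are below) =====
def Claim_equal_truncate_code : Prop := ∀ (code : String) (max_tokens : Int), Dom_truncate_code code max_tokens → Spec_truncate_code code max_tokens (truncate_code code max_tokens)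

-- ===== LEMMAS AND PROOFS =====

-- proof-only helper: the number of lines A keeps
def gCut (max_tokens : Int) : List String → Int → Nat
  | [], _ => 0
  | l :: rest, tc =>
    let lt : Int := (PySem.Str.split₀ l).length
    if tc + lt > max_tokens then 0 else gCut max_tokens rest (tc + lt) + 1

theorem truncAux_eq_take (mt : Int) (lines : List String) (tc : Int) (res : List String) :
    truncAux mt lines tc res = res ++ lines.take (gCut mt lines tc) := by
  induction lines generalizing tc res with
  | nil => simp [truncAux, gCut]
  | cons l rest ih =>
    simp only [truncAux, gCut]
    split
    · simp
    · rw [ih]; simp [List.take_succ_cons]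

theorem gCut_le_length (mt : Int) (lines : List String) (tc : Int) :
    gCut mt lines tc ≤ lines.length := by
  induction lines generalizing tc with
  | nil => simp [gCut]
  | cons l rest ih =>
    simp only [gCut]
    split
    · simp
    · simp only [List.length_cons]
      exact Nat.add_le_add_right (ih _) 1

theorem length_prefixTab (lines : List String) (tc : Int) :
    (prefixTab lines tc).length = lines.length := by
  induction lines generalizing tc with
  | nil => rfl
  | cons l rest ih => simp [prefixTab, ih]

theorem prefixTab_lb (lines : List String) (tc : Int) :
    ∀ x ∈ prefixTab lines tc, tc ≤ x := by
  induction lines generalizing tc with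
  | nil => simp [prefixTab]
  | cons l rest ih =>
    intro x hx
    simp only [prefixTab, List.mem_cons] at hx
    have hnn : (0 : Int) ≤ ((PySem.Str.split₀ l).length : Int) := by positivity
    rcases hx with h | h
    · omega
    · have := ih _ _ h; omega

-- indices below the cut have prefix sum ≤ max_tokens
theorem prefixTab_good (mt : Int) (lines : List String) (tc : Int) :
    ∀ i, i < gCut mt lines tc → (prefixTab lines tc).getD i 0 ≤ mt := by
  induction lines generalizing tc with
  | nil => simp [gCut]
  | cons l rest ih =>
    intro i hi
    simp only [gCut] at hi
    split at hi
    · omega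
    · rename_i h
      cases i with
      | zero => simp only [prefixTab, List.getD_cons_zero]; omega
      | succ j =>
        simp only [prefixTab, List.getD_cons_succ]
        exact ih _ _ (by omega)

-- indices at or beyond the cut (inside the table) have prefix sum > max_tokens
theorem prefixTab_bad (mt : Int) (lines : List String) (tc : Int) :
    ∀ i, gCut mt lines tc ≤ i → i < lines.length → mt < (prefixTab lines tc).getD i 0 := by
  induction lines generalizing tc with
  | nil => simp
  | cons l rest ih =>
    intro i hg hi
    simp only [gCut] at hg
    split at hg
    · rename_i h
      cases i with
      | zero => simp only [prefixTab, List.getD_cons_zero]; omega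
      | succ j =>
        simp only [prefixTab, List.getD_cons_succ]
        have hj : j < rest.length := by simpa using hi
        have hmem : (prefixTab rest (tc + ((PySem.Str.split₀ l).length : Int))).getD j 0
            ∈ prefixTab rest (tc + ((PySem.Str.split₀ l).length : Int)) := by
          rw [List.getD_eq_getElem _ _ (by rw [length_prefixTab]; exact hj)]
          exact List.getElem_mem _
        have := prefixTab_lb rest (tc + ((PySem.Str.split₀ l).length : Int)) _ hmem
        omega
    · cases i with
      | zero => omega
      | succ j =>
        simp only [prefixTab, List.getD_cons_succ]
        exact ih _ _ (by omega) (by simpa using hi)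

theorem cutScan_eq_min (mt : Int) (lines : List String) (tc : Int) (k : Nat)
    (hk : k ≤ lines.length) :
    cutScan (prefixTab lines tc) mt k = min k (gCut mt lines tc) := by
  induction k with
  | zero => simp [cutScan]
  | succ k ih =>
    simp only [cutScan]
    split
    · rename_i h
      have hgle : gCut mt lines tc ≤ k := by
        by_contra hlt
        have := prefixTab_good mt lines tc k (by omega)
        omega
      rw [ih (by omega)]
      omega
    · rename_i h
      have : ¬ gCut mt lines tc ≤ k := by
        intro hle
        have := prefixTab_bad mt lines tc k hle (by omega)
        omega
      omega

-- ===== VERDICT (by name: the statement is the Claim_ definition above) =====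
theorem truncate_code_spec : Claim_equal_truncate_code := by
  intro code mt _
  unfold Spec_truncate_code truncate_code truncate_code_alt
  dsimp only
  have hcut := cutScan_eq_min mt (PySem.Str.splitlines code) 0 (PySem.Str.splitlines code).length (le_refl _)
  have hg := gCut_le_length mt (PySem.Str.splitlines code) 0
  rw [truncAux_eq_take, hcut, Nat.min_eq_right hg]
  simp only [List.nil_append]
  set lines := PySem.Str.splitlines code with hl
  set g := gCut mt lines 0 with hgdef
  by_cases hz : g = 0
  · simp [hz]
  · have htk : lines.take g ≠ [] := by
      have hlen : (lines.take g).length = g := by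
        rw [List.length_take]; omega
      intro h
      rw [h] at hlen
      simp at hlen
      omega
    simp [htk, Nat.pos_of_ne_zero hz]
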